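-- pv_equiv track=rewrite | github.com/liver0377/agentic-rag | scripts/evaluate_memory_v2.py | _find_first_relevant_rank
-- ===== SOURCE A (Python) =====
-- from typing import Any, Dict, List, Optional
--
-- def _find_first_relevant_rank(
--
--     recalled_memories: List[Dict[str, Any]],
--     expected_keywords: List[str],
-- ) -> Optional[int]:
--     """找到第一个相关记忆的排名（用于 MRR 计算）。"""
--     if not expected_keywords:
--         return None
--
--     for rank, memory in enumerate(recalled_memories, start=1):
--         content = memory.get("content", "").lower()
--         for keyword in expected_keywords:
--             if keyword.lower() in content:
--                 return rank
--
--     return None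
-- ===== SOURCE B (Python) =====
-- from typing import Any, Dict, List, Optional
--
-- def _find_first_relevant_rank(
--     recalled_memories: List[Dict[str, Any]],
--     expected_keywords: List[str],
-- ) -> Optional[int]:
--     """Keyword-major scan: per keyword find the first matching memory index,
--     answer is 1 + the minimum of those indices (None if no keyword matches)."""
--     if not expected_keywords:
--         return None
--     contents = [m.get("content", "").lower() for m in recalled_memories]
--     best = None
--     for keyword in expected_keywords:
--         k = keyword.lower()
--         hit = None
--         i = 0
--         for c in contents:
--             if k in c:
--                 hit = i
--                 break
--             i += 1
--         if hit is not None: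
--             best = hit if best is None else min(best, hit)
--     return None if best is None else best + 1
-- ===== Notes on version B (the rewrite author's own statement) =====
-- stated objective: alternative
-- what changed: B swaps the loop nesting: instead of scanning memories outer and keywords inner, it computes for each keyword the first memory index whose lowered content contains it, and returns 1 + the minimum of those indices (None if no keyword ever matches).
import Mathlib
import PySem

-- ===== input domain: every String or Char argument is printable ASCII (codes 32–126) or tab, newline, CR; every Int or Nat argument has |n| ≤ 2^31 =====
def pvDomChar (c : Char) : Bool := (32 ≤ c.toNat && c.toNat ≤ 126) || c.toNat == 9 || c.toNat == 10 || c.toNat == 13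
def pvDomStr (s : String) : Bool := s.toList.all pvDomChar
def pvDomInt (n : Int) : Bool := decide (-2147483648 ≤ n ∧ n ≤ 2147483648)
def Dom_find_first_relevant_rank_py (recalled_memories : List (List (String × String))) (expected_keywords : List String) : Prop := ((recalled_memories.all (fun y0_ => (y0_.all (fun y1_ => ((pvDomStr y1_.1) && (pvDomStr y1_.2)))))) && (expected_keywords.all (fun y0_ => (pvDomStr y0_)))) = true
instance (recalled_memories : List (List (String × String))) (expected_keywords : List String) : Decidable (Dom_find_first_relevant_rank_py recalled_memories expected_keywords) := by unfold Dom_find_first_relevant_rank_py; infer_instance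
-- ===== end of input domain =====

-- B swaps the loop nesting (keyword-major instead of memory-major): an alternative of the same cost; return values proved equal.

-- ===== PORT A =====
-- inner 'for keyword in expected_keywords: if keyword.lower() in content: return rank'
def pvAInner (content : String) : List String → Bool
  | [] => false
  | kw :: kws =>
      if PySem.Str.isIn (PySem.Str.lower kw) content then true else pvAInner content kws

-- outer 'for rank, memory in enumerate(recalled_memories, start=1)'
def pvALoop (kws : List String) : List (List (String × String)) → Int → Option Int
  | [], _ => none
  | m :: ms, rank =>
      let content := PySem.Str.lower ((PySem.Dict.mk m).getD "content" "")
      if pvAInner content kws then some rank else pvALoop kws ms (rank + 1)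

def find_first_relevant_rank_py (recalled_memories : List (List (String × String))) (expected_keywords : List String) : Option Int :=
  if expected_keywords = [] then none
  else pvALoop expected_keywords recalled_memories 1

-- ===== PORT B =====
-- 'for c in contents: if k in c: hit = i; break' — first index of contents containing k
def pvBFirst (k : String) : List String → Nat → Option Nat
  | [], _ => none
  | c :: cs, i => if PySem.Str.isIn k c then some i else pvBFirst k cs (i + 1)

-- 'best = hit if best is None else min(best, hit)'
def pvBStep (best : Option Nat) (hit : Option Nat) : Option Nat :=
  match hit with
  | none => best
  | some i => match best with | none => some i | some b => some (min b i)

-- 'for keyword in expected_keywords: …'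
def pvBLoop (contents : List String) : List String → Option Nat → Option Nat
  | [], best => best
  | kw :: kws, best =>
      pvBLoop contents kws (pvBStep best (pvBFirst (PySem.Str.lower kw) contents 0))

def find_first_relevant_rank_py_alt (recalled_memories : List (List (String × String))) (expected_keywords : List String) : Option Int :=
  if expected_keywords = [] then none
  else
    let contents := recalled_memories.map (fun m => PySem.Str.lower ((PySem.Dict.mk m).getD "content" ""))
    match pvBLoop contents expected_keywords none with
    | none => none
    | some b => some ((b : Int) + 1)

-- ===== PRECONDITION & SPEC =====
def Spec_find_first_relevant_rank_py (recalled_memories : List (List (String × String))) (expected_keywords : List String) (out : Option Int) : Prop := out = find_first_relevant_rank_py_alt recalled_memories expected_keywords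
instance (recalled_memories : List (List (String × String))) (expected_keywords : List String) (out : Option Int) : Decidable (Spec_find_first_relevant_rank_py recalled_memories expected_keywords out) := by unfold Spec_find_first_relevant_rank_py; infer_instance

-- ===== CLAIM (what is proved, stated in full; the proofs are below) =====
def Claim_equal_find_first_relevant_rank_py : Prop := ∀ (recalled_memories : List (List (String × String))) (expected_keywords : List String), Dom_find_first_relevant_rank_py recalled_memories expected_keywords → Spec_find_first_relevant_rank_py recalled_memories expected_keywords (find_first_relevant_rank_py recalled_memories expected_keywords)

-- ===== LEMMAS AND PROOFS =====

-- A's inner loop is 'any keyword matches'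
theorem pvAInner_eq_any (content : String) (kws : List String) :
    pvAInner content kws = kws.any (fun kw => PySem.Str.isIn (PySem.Str.lower kw) content) := by
  induction kws with
  | nil => rfl
  | cons kw kws ih =>
      simp only [pvAInner, ih, List.any_cons]
      cases h : PySem.Str.isIn (PySem.Str.lower kw) content <;> simp

-- A's outer loop is findIdx? over the lowered contents, shifted by rank
theorem pvALoop_eq_findIdx (kws : List String) (ms : List (List (String × String))) (rank : Int) :
    pvALoop kws ms rank =
      ((ms.map (fun m => PySem.Str.lower ((PySem.Dict.mk m).getD "content" ""))).findIdx?
        (fun c => kws.any (fun kw => PySem.Str.isIn (PySem.Str.lower kw) c))).map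
        (fun j => rank + (j : Int)) := by
  induction ms generalizing rank with
  | nil => rfl
  | cons m ms ih =>
      simp only [pvALoop, List.map_cons, List.findIdx?_cons, pvAInner_eq_any]
      split_ifs with h
      · simp
      · simp only [ih (rank + 1)]
        cases (ms.map _).findIdx? _ <;> simp
        omega

-- shifting pvBFirst's index accumulator
theorem pvBFirst_shift (k : String) (cs : List String) (i : Nat) :
    pvBFirst k cs (i + 1) = (pvBFirst k cs i).map (· + 1) := by
  induction cs generalizing i with
  | nil => rfl
  | cons c cs ih => simp [pvBFirst]; split_ifs <;> simp [ih]

-- pvBStep is min on Option Nat; algebraic facts used below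
theorem pvBStep_zero (best : Option Nat) : pvBStep best (some 0) = some 0 := by
  cases best <;> simp [pvBStep]

theorem pvBStep_map_succ (best hit : Option Nat) :
    pvBStep (best.map (· + 1)) (hit.map (· + 1)) = (pvBStep best hit).map (· + 1) := by
  cases best <;> cases hit <;> simp [pvBStep] <;> omega

-- if best is some 0 the loop keeps it
theorem pvBLoop_zero (contents : List String) (kws : List String) :
    pvBLoop contents kws (some 0) = some 0 := by
  induction kws with
  | nil => rfl
  | cons kw kws ih =>
      simp only [pvBLoop]
      have : pvBStep (some 0) (pvBFirst (PySem.Str.lower kw) contents 0) = some 0 := by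
        cases pvBFirst (PySem.Str.lower kw) contents 0 <;> simp [pvBStep]
      rw [this, ih]

-- empty contents: the loop returns best unchanged
theorem pvBLoop_nil (kws : List String) (best : Option Nat) :
    pvBLoop [] kws best = best := by
  induction kws generalizing best with
  | nil => rfl
  | cons kw kws ih => simp [pvBLoop, pvBFirst, pvBStep, ih]

-- head content matched by some keyword: the loop hits index 0
theorem pvBLoop_head_hit (c : String) (cs : List String) (kws : List String) (best : Option Nat)
    (h : kws.any (fun kw => PySem.Str.isIn (PySem.Str.lower kw) c) = true) :
    pvBLoop (c :: cs) kws best = some 0 := by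
  induction kws generalizing best with
  | nil => simp at h
  | cons kw kws ih =>
      simp only [List.any_cons, Bool.or_eq_true] at h
      simp only [pvBLoop, pvBFirst]
      rcases h with h | h
      · simp only [h, if_true, pvBStep_zero]
        exact pvBLoop_zero _ _
      · exact ih _ h

-- head content matched by no keyword: the loop shifts
theorem pvBLoop_head_miss (c : String) (cs : List String) (kws : List String) (best : Option Nat)
    (h : kws.any (fun kw => PySem.Str.isIn (PySem.Str.lower kw) c) = false) :
    pvBLoop (c :: cs) kws (best.map (· + 1)) = (pvBLoop cs kws best).map (· + 1) := by
  induction kws generalizing best with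
  | nil => rfl
  | cons kw kws ih =>
      simp only [List.any_cons, Bool.or_eq_false_iff] at h
      simp only [pvBLoop, pvBFirst, h.1, Bool.false_eq_true, if_false]
      rw [pvBFirst_shift, pvBStep_map_succ]
      exact ih _ h.2

-- B's keyword-major loop computes findIdx? of 'any keyword matches'
theorem pvBLoop_eq_findIdx (contents : List String) (kws : List String) :
    pvBLoop contents kws none =
      contents.findIdx? (fun c => kws.any (fun kw => PySem.Str.isIn (PySem.Str.lower kw) c)) := by
  induction contents with
  | nil => simp [pvBLoop_nil]
  | cons c cs ih =>
      rw [List.findIdx?_cons]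
      cases h : kws.any (fun kw => PySem.Str.isIn (PySem.Str.lower kw) c) with
      | true => simp [pvBLoop_head_hit c cs kws none h]
      | false =>
          have := pvBLoop_head_miss c cs kws none h
          simp only [Option.map_none] at this
          simp [this, ih]

-- ===== VERDICT (by name: the statement is the Claim_ definition above) =====
theorem find_first_relevant_rank_py_spec : Claim_equal_find_first_relevant_rank_py := by
  intro rm kws _
  unfold Spec_find_first_relevant_rank_py find_first_relevant_rank_py find_first_relevant_rank_py_alt
  split_ifs with h
  · rfl
  · simp only [pvALoop_eq_findIdx, pvBLoop_eq_findIdx]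
    cases (rm.map _).findIdx? _ <;> simp
    omega
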